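-- pv_equiv track=rewrite | github.com/Lilyhappiness/RETAIN_vs_Regression | regression.py | format_matrix
-- ===== SOURCE A (Python) =====
-- def format_matrix(actuals, predictions):
--     """ Formats predictions and actual labels as confusion matrix (string).
--     Args:
--         actuals (list int) : list of actual labels
--         predictions (list int) : list of predicted labels
--     Returns:
--         matrix (str) : actual x predicted labels in confusion matrix as string
--     """
--     counts = {}
--     for prediction, actual in zip(predictions, actuals):
--         counts.setdefault(actual, {}).setdefault(prediction, 0)
--         counts[actual][prediction] += 1
--     string = 'Rows=Actual; Columns=Predicted\n'
--     string += '\t0\t1\n'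
--     for actual in 0, 1:
--         string += str(actual)
--         for prediction in 0, 1:
--             try:
--                 count = counts[actual][prediction]
--             except KeyError:
--                 count = 0
--             string += '\t' + str(count)
--         string += '\n'
--     return string
-- ===== SOURCE B (Python) =====
-- def format_matrix(actuals, predictions):
--     """Confusion-matrix string: each of the four cells is counted directly
--     from zip(actuals, predictions); no count table is built."""
--     pairs = list(zip(actuals, predictions))
--     def cell(a, p):
--         return sum(1 for x, y in pairs if x == a and y == p)
--     return ('Rows=Actual; Columns=Predicted\n'
--             '\t0\t1\n'
--             '0\t%d\t%d\n'
--             '1\t%d\t%d\n' % (cell(0, 0), cell(0, 1), cell(1, 0), cell(1, 1)))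
-- ===== Notes on version B (the rewrite author's own statement) =====
-- stated objective: simpler
-- what changed: Replaces the nested-dict count table plus a double loop with try/except lookups by four direct filtered counts over zip(actuals, predictions) interpolated into one format string.
import Mathlib
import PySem

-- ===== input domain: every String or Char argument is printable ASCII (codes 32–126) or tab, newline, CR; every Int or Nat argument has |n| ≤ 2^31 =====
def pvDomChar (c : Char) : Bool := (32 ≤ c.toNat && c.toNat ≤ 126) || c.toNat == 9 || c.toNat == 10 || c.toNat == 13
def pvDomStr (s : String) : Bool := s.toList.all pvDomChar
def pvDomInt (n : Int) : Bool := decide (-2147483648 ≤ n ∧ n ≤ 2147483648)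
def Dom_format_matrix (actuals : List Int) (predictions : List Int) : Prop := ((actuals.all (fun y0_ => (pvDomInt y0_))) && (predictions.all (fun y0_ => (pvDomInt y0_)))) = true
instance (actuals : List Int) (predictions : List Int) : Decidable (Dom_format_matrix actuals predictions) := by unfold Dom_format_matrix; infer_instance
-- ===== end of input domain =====

-- B replaces A's nested-dict count table and try/except lookups by four direct
-- filtered counts over the zipped lists (objective: simpler).

-- ===== PORT A =====
-- one pass of A's loop body: counts.setdefault(actual, {}).setdefault(prediction, 0);
-- counts[actual][prediction] += 1   (functional: update the inner dict in place)
def fmStepA (counts : PySem.Dict Int (PySem.Dict Int Int)) (pa : Int × Int) :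
    PySem.Dict Int (PySem.Dict Int Int) :=
  let counts := PySem.Dict.modify counts pa.2 PySem.Dict.empty
    (fun inner => inner.setdefault pa.1 0)
  PySem.Dict.modify counts pa.2 PySem.Dict.empty
    (fun inner => inner.modify pa.1 0 (· + 1))

def format_matrix (actuals : List Int) (predictions : List Int) : String :=
  let counts := (predictions.zip actuals).foldl fmStepA PySem.Dict.empty
  let string := "Rows=Actual; Columns=Predicted\n"
  let string := string ++ "\t0\t1\n"
  ([0, 1] : List Int).foldl (fun string actual =>
    let string := string ++ PySem.Int.toStr actual
    let string := ([0, 1] : List Int).foldl (fun string prediction =>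
      -- try: count = counts[actual][prediction]  except KeyError: count = 0
      let count : Int :=
        match counts.get? actual with
        | none => 0
        | some inner =>
          match inner.get? prediction with
          | none => 0
          | some c => c
      string ++ "\t" ++ PySem.Int.toStr count) string
    string ++ "\n") string

-- ===== PORT B =====
def fmCell (pairs : List (Int × Int)) (a p : Int) : Int :=
  ((pairs.filter (fun x => x.1 == a && x.2 == p)).length : Int)

def format_matrix_alt (actuals : List Int) (predictions : List Int) : String :=
  let pairs := actuals.zip predictions
  "Rows=Actual; Columns=Predicted\n" ++ "\t0\t1\n" ++
  "0\t" ++ PySem.Int.toStr (fmCell pairs 0 0) ++ "\t" ++ PySem.Int.toStr (fmCell pairs 0 1) ++ "\n" ++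
  "1\t" ++ PySem.Int.toStr (fmCell pairs 1 0) ++ "\t" ++ PySem.Int.toStr (fmCell pairs 1 1) ++ "\n"

-- ===== PRECONDITION & SPEC =====
def Spec_format_matrix (actuals : List Int) (predictions : List Int) (out : String) : Prop := out = format_matrix_alt actuals predictions
instance (actuals : List Int) (predictions : List Int) (out : String) : Decidable (Spec_format_matrix actuals predictions out) := by unfold Spec_format_matrix; infer_instance

-- ===== CLAIM (what is proved, stated in full; the proofs are below) =====
def Claim_equal_format_matrix : Prop := ∀ (actuals : List Int) (predictions : List Int), Dom_format_matrix actuals predictions → Spec_format_matrix actuals predictions (format_matrix actuals predictions)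

-- ===== LEMMAS AND PROOFS =====

-- A's try/except lookup, as a nested getD
def fmLk (d : PySem.Dict Int (PySem.Dict Int Int)) (a p : Int) : Int :=
  (d.getD a PySem.Dict.empty).getD p 0

theorem fmLk_match (d : PySem.Dict Int (PySem.Dict Int Int)) (a p : Int) :
    (match d.get? a with
     | none => (0 : Int)
     | some inner => match inner.get? p with | none => 0 | some c => c) = fmLk d a p := by
  unfold fmLk
  rw [PySem.Dict.getD_eq_get?_getD d a]
  rcases h : d.get? a with _ | inner
  · simp [PySem.Dict.getD_empty]
  · simp only [Option.getD_some]
    rw [PySem.Dict.getD_eq_get?_getD inner p]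
    rcases h2 : inner.get? p with _ | c <;> simp

theorem fmLk_step (d : PySem.Dict Int (PySem.Dict Int Int)) (q b a p : Int) :
    fmLk (fmStepA d (q, b)) a p = fmLk d a p + (if a = b ∧ p = q then 1 else 0) := by
  unfold fmLk fmStepA
  by_cases hab : a = b
  · subst hab
    by_cases hpq : p = q
    · subst hpq
      simp [PySem.Dict.getD_setdefault_self]
    · have hs : ((d.getD a PySem.Dict.empty).setdefault q 0).getD p 0
          = (d.getD a PySem.Dict.empty).getD p 0 := by
        rw [PySem.Dict.getD_eq_get?_getD, PySem.Dict.get?_setdefault_of_ne,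
            ← PySem.Dict.getD_eq_get?_getD]
        exact hpq
      simp [PySem.Dict.getD_modify, hpq, hs]
  · simp [PySem.Dict.getD_modify, hab]

theorem fmLk_foldl (l : List (Int × Int)) (d : PySem.Dict Int (PySem.Dict Int Int)) (a p : Int) :
    fmLk (l.foldl fmStepA d) a p
      = fmLk d a p + ((l.filter (fun x => x.2 == a && x.1 == p)).length : Int) := by
  induction l generalizing d with
  | nil => simp
  | cons x xs ih =>
    rcases x with ⟨q, b⟩
    simp only [List.foldl_cons, ih, fmLk_step, List.filter_cons]
    by_cases h : a = b ∧ p = q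
    · simp [h.1, h.2]; ring
    · have hb : (b == a && q == p) = false := by
        rcases not_and_or.mp h with h' | h' <;>
          simp <;> intro e <;> exact fun e2 => h' (Eq.symm (by assumption))
      simp [hb, h]

-- the counted quantity is B's cell, with the zip swapped
theorem fmZipSwap (actuals predictions : List Int) (a p : Int) :
    (((predictions.zip actuals).filter (fun x => x.2 == a && x.1 == p)).length : Int)
      = fmCell (actuals.zip predictions) a p := by
  unfold fmCell
  congr 1
  induction actuals generalizing predictions with
  | nil => cases predictions <;> simp
  | cons x xs ih =>
    cases predictions with
    | nil => simp
    | cons y ys =>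
      simp only [List.zip_cons_cons, List.filter_cons]
      split_ifs <;> simp_all

-- ===== VERDICT (by name: the statement is the Claim_ definition above) =====
theorem format_matrix_spec : Claim_equal_format_matrix := by
  intro actuals predictions _
  unfold Spec_format_matrix format_matrix format_matrix_alt
  simp only [List.foldl_cons, List.foldl_nil, fmLk_match]
  have key : ∀ a p : Int, fmLk ((predictions.zip actuals).foldl fmStepA PySem.Dict.empty) a p
      = fmCell (actuals.zip predictions) a p := by
    intro a p
    rw [fmLk_foldl, fmZipSwap]
    simp [fmLk, PySem.Dict.getD_empty]
  rw [key, key, key, key]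
  generalize PySem.Int.toStr (fmCell (actuals.zip predictions) 0 0) = s00
  generalize PySem.Int.toStr (fmCell (actuals.zip predictions) 0 1) = s01
  generalize PySem.Int.toStr (fmCell (actuals.zip predictions) 1 0) = s10
  generalize PySem.Int.toStr (fmCell (actuals.zip predictions) 1 1) = s11
  have h0 : PySem.Int.toStr 0 = "0" := by decide
  have h1 : PySem.Int.toStr 1 = "1" := by decide
  rw [h0, h1]
  apply String.ext
  simp [String.append_assoc]
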